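-- pv_equiv track=rewrite | github.com/datadrivendecisions/datascience | backend/app.py | assign_jigsaw_groups
-- ===== SOURCE A (Python) =====
-- def assign_jigsaw_groups(expert_groups):
--     if not expert_groups:
--         return {}
--     num_jigsaw_groups = max((len(s) for s in expert_groups.values()), default=0)
--     jigsaw_groups = {f"Jigsaw Group {i+1}": [] for i in range(num_jigsaw_groups)}
--     for topic, students in expert_groups.items():
--         for i, student in enumerate(students):
--             student_with_topic = student.copy()
--             student_with_topic["expert_topic"] = topic
--             jigsaw_groups[f"Jigsaw Group {i+1}"].append(student_with_topic)
--     return jigsaw_groups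
-- ===== SOURCE B (Python) =====
-- def assign_jigsaw_groups(expert_groups):
--     num_jigsaw_groups = max((len(s) for s in expert_groups.values()), default=0)
--     jigsaw_groups = {}
--     for i in range(num_jigsaw_groups):
--         group = []
--         for topic, students in expert_groups.items():
--             if i < len(students):
--                 student = students[i].copy()
--                 student["expert_topic"] = topic
--                 group.append(student)
--         jigsaw_groups[f"Jigsaw Group {i+1}"] = group
--     return jigsaw_groups
-- ===== Notes on version B (the rewrite author's own statement) =====
-- stated objective: alternative
-- what changed: B builds the result index-major: for each jigsaw-group index it makes one pass over the topics collecting each topic's i-th student directly, instead of A's topic-major scatter that pre-creates a dict of empty groups and appends each student into it by key lookup.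
import Mathlib
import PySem

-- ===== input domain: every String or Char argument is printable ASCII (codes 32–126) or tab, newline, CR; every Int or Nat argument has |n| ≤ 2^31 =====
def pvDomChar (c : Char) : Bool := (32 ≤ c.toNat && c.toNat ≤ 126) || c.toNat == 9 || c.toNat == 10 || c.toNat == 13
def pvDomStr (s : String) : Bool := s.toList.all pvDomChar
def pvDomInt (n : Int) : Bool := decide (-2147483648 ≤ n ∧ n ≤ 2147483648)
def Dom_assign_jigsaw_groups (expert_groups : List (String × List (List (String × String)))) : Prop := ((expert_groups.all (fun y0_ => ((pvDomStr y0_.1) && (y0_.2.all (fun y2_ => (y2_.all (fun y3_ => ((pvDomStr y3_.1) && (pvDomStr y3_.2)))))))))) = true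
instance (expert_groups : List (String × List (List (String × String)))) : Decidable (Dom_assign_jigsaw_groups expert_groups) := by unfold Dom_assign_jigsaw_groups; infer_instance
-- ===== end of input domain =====

-- B regroups index-major (one pass per jigsaw-group index collecting each topic's i-th student)
-- instead of A's topic-major scatter into a pre-built dict of empty groups; objective: alternative decomposition.


-- f"Jigsaw Group {i+1}"  (shared literal line of both Pythons)
def pvKey (i : Int) : String := "Jigsaw Group " ++ PySem.Int.toStr (i + 1)

-- student.copy(); student["expert_topic"] = topic  (shared literal lines of both Pythons)
def pvWithTopic (topic : String) (st : List (String × String)) : List (String × String) :=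
  ((PySem.Dict.mk st).insert "expert_topic" topic).items

-- ===== PORT A =====
def assign_jigsaw_groups (expert_groups : List (String × List (List (String × String)))) : List (String × List (List (String × String))) :=
  if expert_groups = [] then []
  else
    let num : Int := PySem.List.maxD (expert_groups.map (fun p => PySem.List.len p.2)) (fun x => x) 0
    let init : PySem.Dict String (List (List (String × String))) :=
      PySem.Dict.ofList ((PySem.List.pyRange 0 num).map (fun i => (pvKey i, ([] : List (List (String × String))))))
    -- jigsaw_groups[key].append(x): key is always present (i < num), so this is Dict.modify with append
    (expert_groups.foldl
        (fun d p =>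
          (PySem.List.enumerate p.2).foldl
            (fun d q => d.modify (pvKey q.1) [] (fun g => g ++ [pvWithTopic p.1 q.2])) d)
        init).items

-- ===== PORT B =====
def assign_jigsaw_groups_alt (expert_groups : List (String × List (List (String × String)))) : List (String × List (List (String × String))) :=
  let num : Int := PySem.List.maxD (expert_groups.map (fun p => PySem.List.len p.2)) (fun x => x) 0
  ((PySem.List.pyRange 0 num).foldl
      (fun d i =>
        d.insert (pvKey i)
          (expert_groups.foldl
            (fun acc p =>
              if i < PySem.List.len p.2 then acc ++ [pvWithTopic p.1 (PySem.List.pyGetD p.2 i [])] else acc)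
            []))
      PySem.Dict.empty).items

-- ===== PRECONDITION & SPEC =====
def Spec_assign_jigsaw_groups (expert_groups : List (String × List (List (String × String)))) (out : List (String × List (List (String × String)))) : Prop := out = assign_jigsaw_groups_alt expert_groups
instance (expert_groups : List (String × List (List (String × String)))) (out : List (String × List (List (String × String)))) : Decidable (Spec_assign_jigsaw_groups expert_groups out) := by unfold Spec_assign_jigsaw_groups; infer_instance

-- ===== CLAIM (what is proved, stated in full; the proofs are below) =====
def Claim_equal_assign_jigsaw_groups : Prop := ∀ (expert_groups : List (String × List (List (String × String)))), Dom_assign_jigsaw_groups expert_groups → Spec_assign_jigsaw_groups expert_groups (assign_jigsaw_groups expert_groups)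

-- ===== LEMMAS AND PROOFS =====

-- ---- injectivity of the group label, via a decimal decoder ----

theorem pv_tdc_shift (b f : Nat) : ∀ (n : Nat) (l : List Char),
    Nat.toDigitsCore b f n l = Nat.toDigitsCore b f n [] ++ l := by
  induction f with
  | zero => intro n l; simp [Nat.toDigitsCore]
  | succ f ih =>
    intro n l
    simp only [Nat.toDigitsCore]
    by_cases h : n / b = 0
    · simp [h]
    · simp only [h, if_false]
      rw [ih (n / b) (Nat.digitChar (n % b) :: l), ih (n / b) [Nat.digitChar (n % b)]]
      simp

theorem pv_tdc_fuel (f : Nat) : ∀ (f' n : Nat) (l : List Char), n < f → n < f' →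
    Nat.toDigitsCore 10 f n l = Nat.toDigitsCore 10 f' n l := by
  induction f with
  | zero => intro f' n l h; omega
  | succ f ih =>
    intro f' n l h h'
    cases f' with
    | zero => omega
    | succ f' =>
      simp only [Nat.toDigitsCore]
      by_cases h0 : n / 10 = 0
      · simp [h0]
      · simp only [h0, if_false]
        have hn : 0 < n := by
          rcases Nat.eq_zero_or_pos n with rfl | h1
          · simp at h0
          · exact h1
        have hd : n / 10 < n := Nat.div_lt_self hn (by norm_num)
        exact ih f' (n / 10) _ (by omega) (by omega)

theorem pv_rep_eq (n : Nat) :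
    Nat.toDigits 10 n = (if n < 10 then [] else Nat.toDigits 10 (n / 10)) ++ [Nat.digitChar (n % 10)] := by
  have h10 : n / 10 = 0 ↔ n < 10 := by omega
  by_cases h : n < 10
  · simp only [Nat.toDigits, Nat.toDigitsCore, h10.mpr h, if_true, h]
    simp
  · simp only [Nat.toDigits, Nat.toDigitsCore]
    have h0 : ¬ n / 10 = 0 := by omega
    simp only [h0, if_false, h, if_false]
    rw [pv_tdc_shift]
    congr 1
    exact pv_tdc_fuel n (n/10+1) (n/10) [] (by omega) (by omega)

def pvDec (l : List Char) : Nat := l.foldl (fun a c => a * 10 + (c.toNat - 48)) 0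

theorem pv_digitChar_val (d : Nat) (h : d < 10) : (Nat.digitChar d).toNat = d + 48 := by
  interval_cases d <;> rfl

theorem pv_dec_toDigits (n : Nat) : pvDec (Nat.toDigits 10 n) = n := by
  induction n using Nat.strong_induction_on with
  | _ n ih =>
    rw [pv_rep_eq n]
    by_cases h : n < 10
    · simp [pvDec, h, pv_digitChar_val (n % 10) (by omega)]
    · have : pvDec ((Nat.toDigits 10 (n / 10)) ++ [Nat.digitChar (n % 10)]) =
          pvDec (Nat.toDigits 10 (n / 10)) * 10 + ((Nat.digitChar (n % 10)).toNat - 48) := by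
        simp [pvDec, List.foldl_append]
      simp only [h, if_false, this, ih (n / 10) (by omega), pv_digitChar_val (n % 10) (by omega)]
      omega

theorem pv_toDigits_inj {m n : Nat} (h : Nat.toDigits 10 m = Nat.toDigits 10 n) : m = n := by
  have := congrArg pvDec h
  simpa [pv_dec_toDigits] using this

theorem pvKey_inj {i j : Int} (hi : 0 ≤ i) (hj : 0 ≤ j) (h : pvKey i = pvKey j) : i = j := by
  have h1 := congrArg String.toList h
  simp only [pvKey, String.toList_append, PySem.Int.toList_toStr] at h1
  have h2 : PySem.Int.toChars (i + 1) = PySem.Int.toChars (j + 1) := List.append_cancel_left h1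
  have hni : ¬ (i + 1 < 0) := by omega
  have hnj : ¬ (j + 1 < 0) := by omega
  simp only [PySem.Int.toChars, hni, hnj, if_false] at h2
  have := pv_toDigits_inj h2
  omega

-- ---- Set.update is a no-op when every element is already present ----
theorem pv_set_update_of_mem (s : PySem.Set String) : ∀ (xs : List String), (∀ x ∈ xs, x ∈ s) →
    PySem.Set.update s xs = s := by
  intro xs
  induction xs generalizing s with
  | nil => intro _; rfl
  | cons x t ih =>
    intro h
    rw [PySem.Set.update_cons]
    have hx : PySem.Set.add s x = s := by
      simp [PySem.Set.add, PySem.Set.contains, h x (by simp)]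
    rw [hx]
    exact ih s (fun y hy => h y (by simp [hy]))

-- ---- nodup filter picks the element ----
theorem pv_filter_beq_of_nodup {l : List Int} (hnd : l.Nodup) (a : Int) :
    l.filter (fun x => x == a) = if a ∈ l then [a] else [] := by
  induction l with
  | nil => simp
  | cons x t ih =>
    simp only [List.nodup_cons] at hnd
    by_cases hx : x = a
    · subst hx
      have : t.filter (fun y => y == x) = [] := by
        apply List.filter_eq_nil_iff.mpr
        intro y hy
        simp only [beq_iff_eq]
        intro hyx; exact hnd.1 (hyx ▸ hy)
      simp [this]
    · simp only [List.filter_cons, beq_iff_eq, hx, if_false]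
      rw [ih hnd.2]
      have : (a = x ∨ a ∈ t) ↔ a ∈ t := by
        constructor
        · rintro (rfl | h)
          · exact absurd rfl hx
          · exact h
        · exact Or.inr
      simp [List.mem_cons, this]

-- ---- shared abbreviations for the proof ----
def pvNum (eg : List (String × List (List (String × String)))) : Int :=
  PySem.List.maxD (eg.map (fun p => PySem.List.len p.2)) (fun x => x) 0

def pvGroup (eg : List (String × List (List (String × String)))) (i : Int) : List (List (String × String)) :=
  (eg.filter (fun p => decide (i < PySem.List.len p.2))).map
    (fun p => pvWithTopic p.1 (PySem.List.pyGetD p.2 i []))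

def pvT (eg : List (String × List (List (String × String)))) : List (String × List (List (String × String))) :=
  (PySem.List.pyRange 0 (pvNum eg)).map (fun i => (pvKey i, pvGroup eg i))

def pvL (eg : List (String × List (List (String × String)))) : List (String × List (String × String)) :=
  eg.flatMap (fun p => (PySem.List.enumerate p.2).map (fun q => (pvKey q.1, pvWithTopic p.1 q.2)))

theorem pv_key_map_nodup (l : List Int) (hnd : l.Nodup) (hpos : ∀ x ∈ l, 0 ≤ x) :
    (l.map pvKey).Nodup := by
  refine hnd.map_on ?_
  intro x hx y hy hxy
  exact pvKey_inj (hpos x hx) (hpos y hy) hxy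

theorem pv_range_key_nodup (n : Int) : ((PySem.List.pyRange 0 n).map pvKey).Nodup :=
  pv_key_map_nodup _ (PySem.List.nodup_pyRange_one 0 n)
    (fun _ hx => (PySem.List.mem_pyRange_one.mp hx).1)

theorem pv_B_eq (eg : List (String × List (List (String × String)))) :
    assign_jigsaw_groups_alt eg = pvT eg := by
  simp only [assign_jigsaw_groups_alt, pvT, pvNum]
  rw [PySem.Dict.items_foldl_insert_fresh _ pvKey _ PySem.Dict.empty
      (by intro a _; simp [pysem]) (pv_range_key_nodup _)]
  simp only [show (PySem.Dict.empty : PySem.Dict String (List (List (String × String)))).items = [] from rfl, List.nil_append]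
  apply List.map_congr_left
  intro i _
  congr 1
  rw [PySem.List.foldl_append_ite (fun p => i < PySem.List.len p.2)
      (fun p => pvWithTopic p.1 (PySem.List.pyGetD p.2 i [])) eg []]
  rfl

theorem pv_D0_items (n : Int) :
    (PySem.Dict.ofList ((PySem.List.pyRange 0 n).map (fun i => (pvKey i, ([] : List (List (String × String))))))).items
      = (PySem.List.pyRange 0 n).map (fun i => (pvKey i, [])) := by
  unfold PySem.Dict.ofList PySem.Dict.update
  have h := PySem.Dict.items_foldl_insert_fresh
      ((PySem.List.pyRange 0 n).map (fun i => (pvKey i, ([] : List (List (String × String))))))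
      (fun p => p.1) (fun p => p.2) PySem.Dict.empty
      (by intro a _; simp [pysem]) (by simpa [List.map_map, Function.comp] using pv_range_key_nodup n)
  simpa using h

theorem pv_L_key_mem (eg : List (String × List (List (String × String)))) :
    ∀ x ∈ pvL eg, x.1 ∈ (PySem.List.pyRange 0 (pvNum eg)).map pvKey := by
  intro x hx
  simp only [pvL, List.mem_flatMap, List.mem_map] at hx
  obtain ⟨p, hp, q, hq, rfl⟩ := hx
  obtain ⟨k, hk, rfl⟩ := (PySem.List.mem_enumerate_iff p.2 0 q).mp hq
  refine List.mem_map.mpr ⟨(0 : Int) + k, ?_, rfl⟩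
  refine PySem.List.mem_pyRange_one.mpr ⟨by omega, ?_⟩
  have h1 : PySem.List.len p.2 ∈ eg.map (fun p => PySem.List.len p.2) :=
    List.mem_map.mpr ⟨p, hp, rfl⟩
  have h2 := PySem.List.le_maxD_id (eg.map (fun p => PySem.List.len p.2)) 0 _ h1
  have h3 : (k : Int) < PySem.List.len p.2 := by
    simp only [PySem.List.len]; exact_mod_cast hk
  calc (0 : Int) + k < PySem.List.len p.2 := by omega
    _ ≤ pvNum eg := h2

theorem pv_A_flatten (eg : List (String × List (List (String × String)))) :
    ∀ d : PySem.Dict String (List (List (String × String))),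
    eg.foldl
        (fun d p =>
          (PySem.List.enumerate p.2).foldl
            (fun d q => d.modify (pvKey q.1) [] (fun g => g ++ [pvWithTopic p.1 q.2])) d) d
      = (pvL eg).foldl (fun d x => d.modify x.1 [] (fun g => g ++ [x.2])) d := by
  induction eg with
  | nil => intro d; simp [pvL]
  | cons p rest ih =>
    intro d
    simp only [pvL, List.flatMap_cons, List.foldl_append, List.foldl_cons, List.foldl_map]
    exact ih _

theorem pv_filter_L (eg : List (String × List (List (String × String)))) (i : Int) (hi : 0 ≤ i) :
    ((pvL eg).filter (fun x => x.1 == pvKey i)).map (fun x => x.2) = pvGroup eg i := by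
  induction eg with
  | nil => simp [pvL, pvGroup]
  | cons p rest ih =>
    have hcons : pvL (p :: rest)
        = ((PySem.List.enumerate p.2).map (fun q => (pvKey q.1, pvWithTopic p.1 q.2))) ++ pvL rest := by
      simp [pvL]
    have hhead : (((PySem.List.enumerate p.2).map
          (fun q => (pvKey q.1, pvWithTopic p.1 q.2))).filter (fun x => x.1 == pvKey i)).map (fun x => x.2)
        = if i < PySem.List.len p.2 then [pvWithTopic p.1 (PySem.List.pyGetD p.2 i [])] else [] := by
      rw [PySem.List.enumerate_eq_map_pyRange p.2 [], List.map_map, List.filter_map, List.map_map]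
      rw [List.filter_congr (q := fun j => j == i) ?hc]
      case hc =>
        intro j hj
        have h0 : (0 : Int) ≤ j := (PySem.List.mem_pyRange_one.mp hj).1
        by_cases hji : j = i
        · simp [hji]
        · have hne : pvKey j ≠ pvKey i := fun hcon => hji (pvKey_inj h0 hi hcon)
          simp [hji, hne]
      rw [pv_filter_beq_of_nodup (PySem.List.nodup_pyRange_one 0 (PySem.List.len p.2)) i]
      by_cases hlt : i < PySem.List.len p.2
      · simp only [PySem.List.len] at hlt
        simp [hi, hlt]
      · simp only [PySem.List.len] at hlt
        simp [hlt]
    rw [hcons, List.filter_append, List.map_append, hhead, ih]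
    by_cases hlt : i < PySem.List.len p.2
    · simp only [PySem.List.len] at hlt
      simp [pvGroup, hlt]
    · simp only [PySem.List.len] at hlt
      simp [pvGroup, hlt]

theorem pv_A_core (eg : List (String × List (List (String × String)))) :
    (eg.foldl
        (fun d p =>
          (PySem.List.enumerate p.2).foldl
            (fun d q => d.modify (pvKey q.1) [] (fun g => g ++ [pvWithTopic p.1 q.2])) d)
        (PySem.Dict.ofList ((PySem.List.pyRange 0 (pvNum eg)).map
          (fun i => (pvKey i, ([] : List (List (String × String)))))))).items = pvT eg := by
  rw [pv_A_flatten]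
  set D0 := PySem.Dict.ofList ((PySem.List.pyRange 0 (pvNum eg)).map
      (fun i => (pvKey i, ([] : List (List (String × String)))))) with hD0
  have hD0items := pv_D0_items (pvNum eg)
  have hD0keys : D0.keys = (PySem.List.pyRange 0 (pvNum eg)).map pvKey := by
    rw [hD0]
    simp [PySem.Dict.keys, pv_D0_items, List.map_map, Function.comp]
  have hkeys : ((pvL eg).foldl (fun d x => d.modify x.1 [] (fun g => g ++ [x.2])) D0).keys = D0.keys := by
    rw [PySem.Dict.keys_foldl_modify_key (pvL eg) (fun x => x.1) [] (fun _ x => fun g => g ++ [x.2]) D0]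
    apply pv_set_update_of_mem
    intro x hx
    obtain ⟨y, hy, rfl⟩ := List.mem_map.mp hx
    rw [hD0keys]
    exact pv_L_key_mem eg y hy
  have hnd : ((pvL eg).foldl (fun d x => d.modify x.1 [] (fun g => g ++ [x.2])) D0).keys.Nodup := by
    rw [hkeys, hD0keys]; exact pv_range_key_nodup _
  rw [PySem.Dict.items_eq_map_keys _ hnd []]
  rw [hkeys, hD0keys, List.map_map]
  unfold pvT
  apply List.map_congr_left
  intro i hir
  have hi : (0 : Int) ≤ i := (PySem.List.mem_pyRange_one.mp hir).1
  simp only [Function.comp_apply]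
  congr 1
  rw [PySem.Dict.getD_foldl_modify_append (pvL eg) D0 (pvKey i)]
  have hD0get : D0.getD (pvKey i) [] = [] := by
    refine PySem.Dict.getD_of_mem_items D0 ?_ (by rw [hD0keys]; exact pv_range_key_nodup _) []
    rw [hD0items]
    exact List.mem_map.mpr ⟨i, hir, rfl⟩
  rw [hD0get, List.nil_append]
  exact pv_filter_L eg i hi

theorem pv_A_eq (eg : List (String × List (List (String × String)))) :
    assign_jigsaw_groups eg = pvT eg := by
  by_cases h : eg = []
  · subst h
    simp [assign_jigsaw_groups, pvT, pvNum, PySem.List.maxD]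
    rfl
  · simp only [assign_jigsaw_groups, h, if_false]
    exact pv_A_core eg

-- ===== VERDICT (by name: the statement is the Claim_ definition above) =====
theorem assign_jigsaw_groups_spec : Claim_equal_assign_jigsaw_groups := by
  intro eg _
  unfold Spec_assign_jigsaw_groups
  rw [pv_A_eq, pv_B_eq]
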